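-- pv_equiv track=rewrite | github.com/kubauk/beancount-import-gmail | beancount_gmail/uk_paypal_email/parsing.py | post_process_for_alternate_format
-- ===== SOURCE A (Python) =====
-- def post_process_for_alternate_format(receipt_table_data: list[list[str]]) -> list[list[list[str]]]:
--     result = [[]]
--     for row in receipt_table_data:
--         if len(row) == 3:
--             continue
--         if len(row) == 4 and row[1] == '':
--             if len(result) == 1:
--                 result.append([])
--             result[1].append([row[2], row[3]])
--         else:
--             result[0].append(row)
--     return result
-- ===== SOURCE B (Python) =====
-- def post_process_for_alternate_format(receipt_table_data: list[list[str]]) -> list[list[list[str]]]: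
--     def is_pair(row):
--         return len(row) == 4 and row[1] == ''
--     bucket0 = [row for row in receipt_table_data if len(row) != 3 and not is_pair(row)]
--     bucket1 = [[row[2], row[3]] for row in receipt_table_data if is_pair(row)]
--     result = [bucket0]
--     if bucket1:
--         result.append(bucket1)
--     return result
-- ===== Notes on version B (the rewrite author's own statement) =====
-- stated objective: simpler
-- what changed: Replaces the single branch-dispatching pass that mutates a lazily grown list of buckets with two independent filter passes (one per bucket) followed by assembling the result, appending the second bucket only if non-empty.
import Mathlib
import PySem

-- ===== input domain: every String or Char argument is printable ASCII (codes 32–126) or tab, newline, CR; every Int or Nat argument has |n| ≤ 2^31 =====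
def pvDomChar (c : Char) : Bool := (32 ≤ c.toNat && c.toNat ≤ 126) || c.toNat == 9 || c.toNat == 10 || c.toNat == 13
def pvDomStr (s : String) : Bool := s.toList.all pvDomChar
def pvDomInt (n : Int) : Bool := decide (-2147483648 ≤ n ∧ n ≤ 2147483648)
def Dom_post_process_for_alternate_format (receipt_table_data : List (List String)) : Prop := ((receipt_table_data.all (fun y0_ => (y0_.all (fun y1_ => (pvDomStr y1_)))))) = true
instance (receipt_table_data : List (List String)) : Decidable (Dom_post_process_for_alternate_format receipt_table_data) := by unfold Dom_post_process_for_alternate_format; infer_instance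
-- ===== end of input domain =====

-- B replaces A's single pass mutating a lazily-grown list of buckets by two independent
-- filter passes (one per bucket), appending the second bucket only if non-empty (objective: simpler).

-- ===== PORT A =====
-- One loop step of A: the state is the mutable `result` list of buckets.
def ppafA_step (result : List (List (List String))) (row : List String) : List (List (List String)) :=
  if row.length = 3 then result
  else if row.length = 4 ∧ PySem.List.pyGet? row 1 = some "" then
    -- if len(result) == 1: result.append([])
    let result := if result.length = 1 then result ++ [[]] else result
    -- result[1].append([row[2], row[3]])  (state always has ≥ 2 buckets here)
    match result with
    | b0 :: b1 :: rest =>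
        b0 :: (b1 ++ [[(PySem.List.pyGet? row 2).getD "", (PySem.List.pyGet? row 3).getD ""]]) :: rest
    | r => r
  else
    -- result[0].append(row)
    match result with
    | b0 :: rest => (b0 ++ [row]) :: rest
    | r => r

def post_process_for_alternate_format (receipt_table_data : List (List String)) : List (List (List String)) :=
  receipt_table_data.foldl ppafA_step [[]]

-- ===== PORT B =====
def ppafB_isPair (row : List String) : Bool :=
  row.length == 4 && (PySem.List.pyGet? row 1 == some "")

def ppafB_pair (row : List String) : List String :=
  [(PySem.List.pyGet? row 2).getD "", (PySem.List.pyGet? row 3).getD ""]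

def post_process_for_alternate_format_alt (receipt_table_data : List (List String)) : List (List (List String)) :=
  let bucket0 := receipt_table_data.filter (fun row => !(row.length == 3) && !(ppafB_isPair row))
  let bucket1 := (receipt_table_data.filter ppafB_isPair).map ppafB_pair
  if bucket1 = [] then [bucket0] else [bucket0, bucket1]

-- ===== PRECONDITION & SPEC =====
def Spec_post_process_for_alternate_format (receipt_table_data : List (List String)) (out : List (List (List String))) : Prop := out = post_process_for_alternate_format_alt receipt_table_data
instance (receipt_table_data : List (List String)) (out : List (List (List String))) : Decidable (Spec_post_process_for_alternate_format receipt_table_data out) := by unfold Spec_post_process_for_alternate_format; infer_instance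

-- ===== CLAIM (what is proved, stated in full; the proofs are below) =====
def Claim_equal_post_process_for_alternate_format : Prop := ∀ (receipt_table_data : List (List String)), Dom_post_process_for_alternate_format receipt_table_data → Spec_post_process_for_alternate_format receipt_table_data (post_process_for_alternate_format receipt_table_data)

-- ===== LEMMAS AND PROOFS =====

def ppafF0 (rows : List (List String)) : List (List String) :=
  rows.filter (fun row => !(row.length == 3) && !(ppafB_isPair row))

def ppafF1 (rows : List (List String)) : List (List String) :=
  (rows.filter ppafB_isPair).map ppafB_pair

-- Once the state has two buckets, the fold just appends the filtered pieces to them.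
theorem ppaf_fold_two (rows : List (List String)) (b0 b1 : List (List String)) :
    rows.foldl ppafA_step [b0, b1] = [b0 ++ ppafF0 rows, b1 ++ ppafF1 rows] := by
  induction rows generalizing b0 b1 with
  | nil => simp [ppafF0, ppafF1]
  | cons r rs ih =>
    by_cases h3 : r.length = 3
    · have hp : ppafB_isPair r = false := by
        simp [ppafB_isPair, h3]
      simp [List.foldl, ppafA_step, h3, ppafF0, ppafF1, hp, ih]
    · by_cases hp : r.length = 4 ∧ PySem.List.pyGet? r 1 = some ""
      · have h4 : r.length = 4 := hp.1
        have hr1 : r[1]'(by omega) = "" := by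
          have h := hp.2
          rw [show (1 : Int) = ((1 : Nat) : Int) by norm_num, PySem.List.pyGet?_natCast] at h
          simpa [List.getElem?_eq_getElem (show 1 < r.length by omega)] using h
        have hb : ppafB_isPair r = true := by simp [ppafB_isPair, h4, hr1]
        have hstep : ppafA_step [b0, b1] r = [b0, b1 ++ [ppafB_pair r]] := by
          simp [ppafA_step, hp, hr1, ppafB_pair]
        rw [List.foldl_cons, hstep, ih]
        simp [ppafF0, ppafF1, hb, List.append_assoc]
      · have hb : ppafB_isPair r = false := by
          simp only [ppafB_isPair, Bool.and_eq_false_iff, beq_eq_false_iff_ne]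
          by_cases h4 : r.length = 4
          · right; intro hc; exact hp ⟨h4, hc⟩
          · left; simp [h4]
        simp [List.foldl, ppafA_step, h3, hp, ppafF0, ppafF1, hb, ih]

-- With one bucket, the second bucket is created exactly when a qualifying row appears.
theorem ppaf_fold_one (rows : List (List String)) (b0 : List (List String)) :
    rows.foldl ppafA_step [b0] =
      (if ppafF1 rows = [] then [b0 ++ ppafF0 rows] else [b0 ++ ppafF0 rows, ppafF1 rows]) := by
  induction rows generalizing b0 with
  | nil => simp [ppafF0, ppafF1]
  | cons r rs ih =>
    by_cases h3 : r.length = 3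
    · have hp : ppafB_isPair r = false := by simp [ppafB_isPair, h3]
      simp [List.foldl, ppafA_step, h3, ppafF0, ppafF1, hp, ih]
    · by_cases hp : r.length = 4 ∧ PySem.List.pyGet? r 1 = some ""
      · have h4 : r.length = 4 := hp.1
        have hr1 : r[1]'(by omega) = "" := by
          have h := hp.2
          rw [show (1 : Int) = ((1 : Nat) : Int) by norm_num, PySem.List.pyGet?_natCast] at h
          simpa [List.getElem?_eq_getElem (show 1 < r.length by omega)] using h
        have hb : ppafB_isPair r = true := by simp [ppafB_isPair, h4, hr1]
        have hstep : ppafA_step [b0] r = [b0, [ppafB_pair r]] := by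
          simp [ppafA_step, hp, hr1, ppafB_pair]
        rw [List.foldl_cons, hstep, ppaf_fold_two rs b0 [ppafB_pair r]]
        simp [ppafF0, ppafF1, hb]
      · have hb : ppafB_isPair r = false := by
          simp only [ppafB_isPair, Bool.and_eq_false_iff, beq_eq_false_iff_ne]
          by_cases h4 : r.length = 4
          · right; intro hc; exact hp ⟨h4, hc⟩
          · left; simp [h4]
        simp [List.foldl, ppafA_step, h3, hp, ppafF0, ppafF1, hb, ih]

-- ===== VERDICT (by name: the statement is the Claim_ definition above) =====
theorem post_process_for_alternate_format_spec : Claim_equal_post_process_for_alternate_format := by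
  intro rows _
  unfold Spec_post_process_for_alternate_format
  unfold post_process_for_alternate_format post_process_for_alternate_format_alt
  have h := ppaf_fold_one rows []
  simp only [List.nil_append] at h
  rw [h]
  by_cases h1 : ppafF1 rows = [] <;> simp [ppafF0, ppafF1]
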